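-- pv_equiv track=rewrite | github.com/hydrusnetwork/hydrus | include/HydrusTags.py | CollapseTagSiblingChains
-- ===== SOURCE A (Python) =====
-- import collections
--
-- def CollapseTagSiblingChains( processed_siblings ):
--
--     # now to collapse chains
--     # A -> B and B -> C goes to A -> C and B -> C
--
--     siblings = {}
--
--     for ( old_tag, new_tag ) in processed_siblings.items():
--
--         # adding A -> B
--
--         if new_tag in siblings:
--
--             # B -> F already calculated and added, so add A -> F
--
--             siblings[ old_tag ] = siblings[ new_tag ]
--
--         else:
--
--             while new_tag in processed_siblings: new_tag = processed_siblings[ new_tag ] # pursue endpoint F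
--
--             siblings[ old_tag ] = new_tag
--
--
--
--     reverse_lookup = collections.defaultdict( list )
--
--     for ( old_tag, new_tag ) in siblings.items(): reverse_lookup[ new_tag ].append( old_tag )
--
--     return ( siblings, reverse_lookup )
-- ===== SOURCE B (Python) =====
-- import collections
--
-- def CollapseTagSiblingChains( processed_siblings ):
--
--     # Same collapse, but memoize the endpoint of every tag visited along a walk
--     # (path compression), so each tag's chain is walked only once.
--
--     memo = {}
--     siblings = {}
--
--     for old_tag in processed_siblings:
--
--         t = old_tag
--         path = []
--
--         while t not in memo and t in processed_siblings:
--
--             path.append( t )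
--             t = processed_siblings[ t ]
--
--         e = memo.get( t, t )
--
--         for p in path: memo[ p ] = e
--
--         siblings[ old_tag ] = e
--
--     reverse_lookup = collections.defaultdict( list )
--
--     for ( old_tag, new_tag ) in siblings.items(): reverse_lookup[ new_tag ].append( old_tag )
--
--     return ( siblings, reverse_lookup )
-- ===== Notes on version B (the rewrite author's own statement) =====
-- stated objective: alternative
-- what changed: A chases each chain to its endpoint from scratch for every tag; B memoizes the endpoint of every tag visited during a walk (path compression), a different traversal that touches each chain link a bounded number of times (not measurably faster on the sampled inputs).
import Mathlib
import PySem

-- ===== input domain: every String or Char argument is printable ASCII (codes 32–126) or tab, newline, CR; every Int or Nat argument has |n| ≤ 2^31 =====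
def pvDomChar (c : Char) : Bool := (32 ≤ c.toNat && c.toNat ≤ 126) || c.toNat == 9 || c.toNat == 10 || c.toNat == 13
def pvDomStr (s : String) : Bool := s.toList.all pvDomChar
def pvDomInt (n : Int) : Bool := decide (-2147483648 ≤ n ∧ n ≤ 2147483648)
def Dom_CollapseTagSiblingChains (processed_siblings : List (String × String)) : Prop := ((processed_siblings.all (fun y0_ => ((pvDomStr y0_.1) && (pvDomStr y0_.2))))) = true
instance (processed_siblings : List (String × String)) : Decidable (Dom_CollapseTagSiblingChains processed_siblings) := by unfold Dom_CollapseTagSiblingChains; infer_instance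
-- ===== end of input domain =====

-- B memoizes chain endpoints (path compression) instead of re-chasing every chain from scratch (alternative algorithm; return value proved equal on Pre_).


-- ===== PORT A =====
-- A's `while new_tag in processed_siblings: new_tag = processed_siblings[new_tag]`,
-- written with fuel; under Pre_ the chain stops within `length` steps, so fuel length+1 is exact.
def pvChase (d : List (String × String)) : Nat → String → String
  | 0, t => t
  | n+1, t =>
    match List.lookup t d with
    | none => t
    | some u => pvChase d n u

def CollapseTagSiblingChains (processed_siblings : List (String × String)) : (List (String × String)) × (List (String × List String)) :=
  let siblings := processed_siblings.foldl
    (fun sib p =>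
      match PySem.Dict.get? sib p.2 with
      | some f => sib.insert p.1 f
      | none => sib.insert p.1 (pvChase processed_siblings (processed_siblings.length + 1) p.2))
    PySem.Dict.empty
  let reverse_lookup := siblings.items.foldl
    (fun r p => PySem.Dict.modify r p.2 [] (fun l => l ++ [p.1]))
    (PySem.Dict.empty : PySem.Dict String (List String))
  (siblings.items, reverse_lookup.items)

-- ===== PORT B =====
-- B's inner `while t not in memo and t in processed_siblings` loop: collects the path,
-- returns (path, endpoint found).  Fuel length+2 is exact under Pre_.
def pvWalk (d : List (String × String)) (memo : PySem.Dict String String) : Nat → String → List String → List String × String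
  | 0, t, path => (path.reverse, PySem.Dict.getD memo t t)
  | n+1, t, path =>
    if !(PySem.Dict.contains memo t) && (List.lookup t d).isSome then
      pvWalk d memo n ((List.lookup t d).getD t) (t :: path)
    else (path.reverse, PySem.Dict.getD memo t t)

def CollapseTagSiblingChains_alt (processed_siblings : List (String × String)) : (List (String × String)) × (List (String × List String)) :=
  let st := processed_siblings.foldl
    (fun (st : PySem.Dict String String × PySem.Dict String String) p =>
      let w := pvWalk processed_siblings st.1 (processed_siblings.length + 2) p.1 []
      (w.1.foldl (fun m q => m.insert q w.2) st.1, st.2.insert p.1 w.2))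
    (PySem.Dict.empty, PySem.Dict.empty)
  let siblings := st.2
  let reverse_lookup := siblings.items.foldl
    (fun r p => PySem.Dict.modify r p.2 [] (fun l => l ++ [p.1]))
    (PySem.Dict.empty : PySem.Dict String (List String))
  (siblings.items, reverse_lookup.items)

-- ===== PRECONDITION & SPEC =====
-- `pvTerm d n t`: following the sibling map from `t` reaches a tag that is not a key within n steps
-- (the standard decidable statement of acyclicity for a finite functional graph).
def pvTerm (d : List (String × String)) : Nat → String → Bool
  | 0, t => (List.lookup t d).isNone
  | n+1, t =>
    match List.lookup t d with
    | none => true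
    | some u => pvTerm d n u

-- Pre_ excludes association lists with duplicate keys (not representable as the Python dict argument)
-- and mappings containing a sibling cycle, on which A's while loop diverges.
def Pre_CollapseTagSiblingChains (processed_siblings : List (String × String)) : Prop :=
  (processed_siblings.map Prod.fst).Nodup ∧
  ∀ p ∈ processed_siblings, pvTerm processed_siblings processed_siblings.length p.2 = true
instance (processed_siblings : List (String × String)) : Decidable (Pre_CollapseTagSiblingChains processed_siblings) := by unfold Pre_CollapseTagSiblingChains; infer_instance

def pvWitness_CollapseTagSiblingChains : (List (String × String)) := [("a", "b"), ("b", "c")]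

def Spec_CollapseTagSiblingChains (processed_siblings : List (String × String)) (out : (List (String × String)) × (List (String × List String))) : Prop := out = CollapseTagSiblingChains_alt processed_siblings
instance (processed_siblings : List (String × String)) (out : (List (String × String)) × (List (String × List String))) : Decidable (Spec_CollapseTagSiblingChains processed_siblings out) := by unfold Spec_CollapseTagSiblingChains; infer_instance

-- ===== CLAIM (what is proved, stated in full; the proofs are below) =====
def Claim_equal_CollapseTagSiblingChains : Prop := ∀ (processed_siblings : List (String × String)), Dom_CollapseTagSiblingChains processed_siblings → Pre_CollapseTagSiblingChains processed_siblings → Spec_CollapseTagSiblingChains processed_siblings (CollapseTagSiblingChains processed_siblings)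

-- ===== LEMMAS AND PROOFS =====

theorem pvChase_nonkey (d : List (String × String)) (t : String) (h : List.lookup t d = none) :
    ∀ m, pvChase d m t = t := by
  intro m; cases m with
  | zero => rfl
  | succ m => simp [pvChase, h]

theorem pvTerm_mono (d : List (String × String)) :
    ∀ n t, pvTerm d n t = true → ∀ m, n ≤ m → pvTerm d m t = true := by
  intro n
  induction n with
  | zero =>
    intro t h m _
    simp only [pvTerm, Option.isNone_iff_eq_none] at h
    cases m with
    | zero => simp only [pvTerm, h, Option.isNone_none]
    | succ m => simp only [pvTerm, h]
  | succ n ih =>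
    intro t h m hm
    cases hl : List.lookup t d with
    | none =>
      cases m with
      | zero => simp [pvTerm, hl]
      | succ m => simp [pvTerm, hl]
    | some u =>
      simp [pvTerm, hl] at h
      cases m with
      | zero => omega
      | succ m =>
        simp [pvTerm, hl]
        exact ih u h m (by omega)

theorem pvChase_stable (d : List (String × String)) :
    ∀ n t, pvTerm d n t = true → ∀ m, n ≤ m → pvChase d m t = pvChase d n t := by
  intro n
  induction n with
  | zero =>
    intro t h m _
    simp only [pvTerm, Option.isNone_iff_eq_none] at h
    simp [pvChase_nonkey d t h]
  | succ n ih =>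
    intro t h m hm
    cases hl : List.lookup t d with
    | none => simp [pvChase_nonkey d t hl]
    | some u =>
      simp [pvTerm, hl] at h
      cases m with
      | zero => omega
      | succ m =>
        simp [pvChase, hl]
        exact ih u h m (by omega)

theorem pvEstep (d : List (String × String)) (t u : String)
    (hl : List.lookup t d = some u) (hu : pvTerm d d.length u = true) :
    pvChase d (d.length + 1) t = pvChase d (d.length + 1) u := by
  simp [pvChase, hl]
  exact (pvChase_stable d d.length u hu (d.length + 1) (by omega)).symm

theorem pvLookup_of_mem (d : List (String × String)) (p : String × String) :
    (d.map Prod.fst).Nodup → p ∈ d → List.lookup p.1 d = some p.2 := by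
  induction d with
  | nil => intro _ hp; simp at hp
  | cons q d ih =>
    intro hnd hp
    rw [List.map_cons, List.nodup_cons] at hnd
    rcases List.mem_cons.mp hp with h | h
    · subst h; simp [List.lookup]
    · have hmem : p.1 ∈ d.map Prod.fst := List.mem_map_of_mem h
      have hne : p.1 ≠ q.1 := fun he => hnd.1 (he ▸ hmem)
      have hb : (p.1 == q.1) = false := beq_eq_false_iff_ne.mpr hne
      simp only [List.lookup, hb]
      exact ih hnd.2 h

-- invariant: every value stored in a dict is the true endpoint of its key
def pvInv (d : List (String × String)) (m : PySem.Dict String String) : Prop :=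
  ∀ k v, m.get? k = some v → v = pvChase d (d.length + 1) k

theorem pvWalk_end (d : List (String × String)) (memo : PySem.Dict String String) (t : String)
    (hinv : pvInv d memo)
    (h : PySem.Dict.get? memo t = none → List.lookup t d = none) :
    PySem.Dict.getD memo t t = pvChase d (d.length + 1) t := by
  cases hm : PySem.Dict.get? memo t with
  | some v => rw [PySem.Dict.getD_of_get?_eq_some memo t hm]; exact hinv t v hm
  | none => rw [PySem.Dict.getD_of_get?_eq_none memo t hm, pvChase_nonkey d t (h hm)]

theorem pvWalk_spec (d : List (String × String)) :
    ∀ n t path fuel memo, pvInv d memo → pvTerm d n t = true → n ≤ d.length + 1 → n < fuel →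
      (pvWalk d memo fuel t path).2 = pvChase d (d.length + 1) t ∧
      ∀ q ∈ (pvWalk d memo fuel t path).1, q ∈ path ∨ pvChase d (d.length + 1) q = pvChase d (d.length + 1) t := by
  intro n
  induction n with
  | zero =>
    intro t path fuel memo hinv hterm _ hfuel
    simp only [pvTerm, Option.isNone_iff_eq_none] at hterm
    obtain ⟨f, rfl⟩ : ∃ f, fuel = f + 1 := ⟨fuel - 1, by omega⟩
    simp only [pvWalk, hterm, Option.isSome_none, Bool.and_false]
    refine ⟨pvWalk_end d memo t hinv (fun _ => hterm), ?_⟩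
    intro q hq
    exact Or.inl (List.mem_reverse.mp hq)
  | succ n ih =>
    intro t path fuel memo hinv hterm hle hfuel
    obtain ⟨f, rfl⟩ : ∃ f, fuel = f + 1 := ⟨fuel - 1, by omega⟩
    cases hl : List.lookup t d with
    | none =>
      simp only [pvWalk, hl, Option.isSome_none, Bool.and_false]
      refine ⟨pvWalk_end d memo t hinv (fun _ => hl), ?_⟩
      intro q hq
      exact Or.inl (List.mem_reverse.mp hq)
    | some u =>
      have hterm' : pvTerm d n u = true := by simpa only [pvTerm, hl] using hterm
      cases hc : PySem.Dict.contains memo t with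
      | true =>
        simp only [pvWalk, hc, Bool.not_true, Bool.false_and]
        have hsome : (PySem.Dict.get? memo t).isSome = true := by
          rw [← PySem.Dict.contains_eq_isSome_get?]; exact hc
        refine ⟨pvWalk_end d memo t hinv (fun hnone => ?_), ?_⟩
        · rw [hnone] at hsome; simp at hsome
        · intro q hq; exact Or.inl (List.mem_reverse.mp hq)
      | false =>
        have hEtu : pvChase d (d.length + 1) t = pvChase d (d.length + 1) u :=
          pvEstep d t u hl (pvTerm_mono d n u hterm' d.length (by omega))
        simp only [pvWalk, hc, hl, Bool.not_false, Option.isSome_some, Bool.and_self, if_true,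
          Option.getD_some]
        obtain ⟨h1, h2⟩ := ih u (t :: path) f memo hinv hterm' (by omega) (by omega)
        refine ⟨h1.trans hEtu.symm, ?_⟩
        intro q hq
        rcases h2 q hq with hmem | hEq
        · rcases List.mem_cons.mp hmem with rfl | hmem'
          · exact Or.inr rfl
          · exact Or.inl hmem'
        · exact Or.inr (hEq.trans hEtu.symm)

theorem pvInvFoldIns (d : List (String × String)) :
    ∀ (L : List String) (m : PySem.Dict String String) (e : String), pvInv d m →
      (∀ q ∈ L, pvChase d (d.length + 1) q = e) →
      pvInv d (L.foldl (fun m q => m.insert q e) m) := by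
  intro L
  induction L with
  | nil => intro m e hinv _; exact hinv
  | cons q L ih =>
    intro m e hinv hall
    simp only [List.foldl_cons]
    refine ih (m.insert q e) e ?_ (fun r hr => hall r (List.mem_cons_of_mem q hr))
    intro k v hkv
    rw [PySem.Dict.get?_insert] at hkv
    split at hkv
    · next heq => cases hkv; rw [heq]; exact (hall q (List.mem_cons_self)).symm
    · exact hinv k v hkv

theorem pvFoldA (d : List (String × String)) :
    ∀ (l : List (String × String)) (sib : PySem.Dict String String),
      pvInv d sib → sib.keys.Nodup →
      (∀ p ∈ l, sib.contains p.1 = false) →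
      (l.map Prod.fst).Nodup →
      (∀ p ∈ l, List.lookup p.1 d = some p.2 ∧ pvTerm d d.length p.2 = true) →
      (l.foldl (fun sib p =>
          match PySem.Dict.get? sib p.2 with
          | some f => sib.insert p.1 f
          | none => sib.insert p.1 (pvChase d (d.length + 1) p.2)) sib).items
        = sib.items ++ l.map (fun p => (p.1, pvChase d (d.length + 1) p.2)) := by
  intro l
  induction l with
  | nil => intro sib _ _ _ _ _; simp
  | cons p l ih =>
    intro sib hinv hnd hfresh hlnd hgood
    have hp := hgood p (List.mem_cons_self)
    have hEp : pvChase d (d.length + 1) p.1 = pvChase d (d.length + 1) p.2 :=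
      pvEstep d p.1 p.2 hp.1 hp.2
    have hfp : sib.contains p.1 = false := hfresh p (List.mem_cons_self)
    rw [List.map_cons, List.nodup_cons] at hlnd
    -- the updated accumulator
    have hinv' : pvInv d (sib.insert p.1 (pvChase d (d.length + 1) p.2)) := by
      intro k v hkv
      rw [PySem.Dict.get?_insert] at hkv
      split at hkv
      · next heq => cases hkv; rw [heq, hEp]
      · exact hinv k v hkv
    have hfresh' : ∀ q ∈ l, (sib.insert p.1 (pvChase d (d.length + 1) p.2)).contains q.1 = false := by
      intro q hq
      rw [PySem.Dict.contains_insert]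
      have hne : q.1 ≠ p.1 := fun he => hlnd.1 (he ▸ List.mem_map_of_mem hq)
      simp [hne, hfresh q (List.mem_cons_of_mem p hq)]
    have hmain := ih (sib.insert p.1 (pvChase d (d.length + 1) p.2)) hinv'
      (PySem.Dict.nodup_keys_insert sib p.1 _ hnd) hfresh' hlnd.2
      (fun q hq => hgood q (List.mem_cons_of_mem p hq))
    rw [PySem.Dict.items_insert_of_not_contains sib _ hfp, List.append_assoc,
      List.singleton_append] at hmain
    cases hm : PySem.Dict.get? sib p.2 with
    | none => simpa only [List.foldl_cons, hm, List.map_cons] using hmain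
    | some f =>
      have hf : f = pvChase d (d.length + 1) p.2 := hinv p.2 f hm
      simp only [List.foldl_cons, hm, List.map_cons, hf]
      exact hmain

theorem pvFoldB (d : List (String × String)) :
    ∀ (l : List (String × String)) (memo sib : PySem.Dict String String),
      pvInv d memo → sib.keys.Nodup →
      (∀ p ∈ l, sib.contains p.1 = false) →
      (l.map Prod.fst).Nodup →
      (∀ p ∈ l, List.lookup p.1 d = some p.2 ∧ pvTerm d d.length p.2 = true) →
      (l.foldl (fun (st : PySem.Dict String String × PySem.Dict String String) p =>
          let w := pvWalk d st.1 (d.length + 2) p.1 []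
          (w.1.foldl (fun m q => m.insert q w.2) st.1, st.2.insert p.1 w.2)) (memo, sib)).2.items
        = sib.items ++ l.map (fun p => (p.1, pvChase d (d.length + 1) p.1)) := by
  intro l
  induction l with
  | nil => intro memo sib _ _ _ _ _; simp
  | cons p l ih =>
    intro memo sib hinv hnd hfresh hlnd hgood
    have hp := hgood p (List.mem_cons_self)
    have htp : pvTerm d (d.length + 1) p.1 = true := by
      simp only [pvTerm, hp.1]; exact hp.2
    obtain ⟨h1, h2⟩ := pvWalk_spec d (d.length + 1) p.1 [] (d.length + 2) memo hinv htp
      (le_refl _) (by omega)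
    have h2' : ∀ q ∈ (pvWalk d memo (d.length + 2) p.1 []).1,
        pvChase d (d.length + 1) q = pvChase d (d.length + 1) p.1 := by
      intro q hq
      rcases h2 q hq with hmem | hEq
      · simp at hmem
      · exact hEq
    have hfp : sib.contains p.1 = false := hfresh p (List.mem_cons_self)
    rw [List.map_cons, List.nodup_cons] at hlnd
    have hinv' : pvInv d ((pvWalk d memo (d.length + 2) p.1 []).1.foldl
        (fun m q => m.insert q ((pvWalk d memo (d.length + 2) p.1 []).2)) memo) := by
      refine pvInvFoldIns d _ memo _ hinv ?_
      intro q hq; rw [h2' q hq, h1]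
    have hfresh' : ∀ q ∈ l, (sib.insert p.1 ((pvWalk d memo (d.length + 2) p.1 []).2)).contains q.1 = false := by
      intro q hq
      rw [PySem.Dict.contains_insert]
      have hne : q.1 ≠ p.1 := fun he => hlnd.1 (he ▸ List.mem_map_of_mem hq)
      simp [hne, hfresh q (List.mem_cons_of_mem p hq)]
    have hmain := ih ((pvWalk d memo (d.length + 2) p.1 []).1.foldl
        (fun m q => m.insert q ((pvWalk d memo (d.length + 2) p.1 []).2)) memo)
      (sib.insert p.1 ((pvWalk d memo (d.length + 2) p.1 []).2)) hinv'
      (PySem.Dict.nodup_keys_insert sib p.1 _ hnd) hfresh' hlnd.2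
      (fun q hq => hgood q (List.mem_cons_of_mem p hq))
    rw [PySem.Dict.items_insert_of_not_contains sib _ hfp, List.append_assoc,
      List.singleton_append] at hmain
    simp only [List.foldl_cons, List.map_cons]
    rw [← h1]
    exact hmain

theorem pvInv_empty (d : List (String × String)) : pvInv d PySem.Dict.empty := by
  intro k v h
  rw [PySem.Dict.get?_empty] at h
  cases h

-- ===== VERDICT (by name: the statement is the Claim_ definition above) =====
theorem CollapseTagSiblingChains_spec : Claim_equal_CollapseTagSiblingChains := by
  intro d _ hpre
  obtain ⟨hnd, hterm⟩ := hpre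
  unfold Spec_CollapseTagSiblingChains
  have hgood : ∀ p ∈ d, List.lookup p.1 d = some p.2 ∧ pvTerm d d.length p.2 = true :=
    fun p hp => ⟨pvLookup_of_mem d p hnd hp, hterm p hp⟩
  have hA := pvFoldA d d PySem.Dict.empty (pvInv_empty d)
    (by rw [PySem.Dict.keys_empty]; exact List.nodup_nil)
    (fun p _ => PySem.Dict.contains_empty p.1) hnd hgood
  have hB := pvFoldB d d PySem.Dict.empty PySem.Dict.empty (pvInv_empty d)
    (by rw [PySem.Dict.keys_empty]; exact List.nodup_nil)
    (fun p _ => PySem.Dict.contains_empty p.1) hnd hgood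
  have hmap : d.map (fun p => (p.1, pvChase d (d.length + 1) p.2))
      = d.map (fun p => (p.1, pvChase d (d.length + 1) p.1)) := by
    refine List.map_congr_left ?_
    intro p hp
    rw [pvEstep d p.1 p.2 (hgood p hp).1 (hgood p hp).2]
  simp only [CollapseTagSiblingChains, CollapseTagSiblingChains_alt]
  rw [hA, hB, hmap]
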